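-- pv_equiv track=rewrite | github.com/davidmeijer/Rosalind | LGIS/LGIS_Python/longest_increasing_subsequence.py | finalize_route
-- ===== SOURCE A (Python) =====
-- def finalize_route(current_route, left_perms):
--     """"""
--     for left_perm in left_perms:
--         if left_perm < current_route[-1]:
--             new_route = current_route + [left_perm]
--             next_perms = left_perms[(left_perms.index(left_perm))+1:]
--             if new_route[-1] == 1 or len(next_perms) == 0 or new_route[-1] < min(next_perms):
--                 yield new_route
--             else:
--                 for route in finalize_route(new_route, next_perms):
--                     yield route
-- ===== SOURCE B (Python) =====
-- def finalize_route(current_route, left_perms):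
--     # Iterative version: the recursive generator is replaced by an explicit
--     # stack of (route, perms, emit) states, popped in DFS order.
--     stack = [(current_route, left_perms, False)]
--     while stack:
--         route, perms, emit = stack.pop()
--         if emit:
--             yield route
--             continue
--         children = []
--         for v in perms:
--             if v < route[-1]:
--                 new_route = route + [v]
--                 tail = perms[perms.index(v) + 1:]
--                 done = new_route[-1] == 1 or not tail or new_route[-1] < min(tail)
--                 children.append((new_route, tail, done))
--         stack.extend(reversed(children))
-- ===== Notes on version B (the rewrite author's own statement) =====
-- stated objective: alternative
-- what changed: The recursive generator is replaced by an iterative DFS driven by an explicit stack of (route, perms, emit) states, pushing each state's children in reverse so they are popped in the original left-to-right yield order.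
import Mathlib
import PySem

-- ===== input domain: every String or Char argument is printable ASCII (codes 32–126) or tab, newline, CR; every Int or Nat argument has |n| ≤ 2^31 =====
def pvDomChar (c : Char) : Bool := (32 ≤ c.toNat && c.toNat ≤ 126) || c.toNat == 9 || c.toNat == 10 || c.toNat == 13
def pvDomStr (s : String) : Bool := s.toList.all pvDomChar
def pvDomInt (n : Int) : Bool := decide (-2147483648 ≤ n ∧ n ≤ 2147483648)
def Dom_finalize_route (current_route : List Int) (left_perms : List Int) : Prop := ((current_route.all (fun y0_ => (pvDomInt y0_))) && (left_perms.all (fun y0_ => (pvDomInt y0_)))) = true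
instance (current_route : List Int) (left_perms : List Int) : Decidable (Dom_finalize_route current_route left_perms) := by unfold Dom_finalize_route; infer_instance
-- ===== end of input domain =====

-- B replaces A's recursive generator by an iterative DFS over an explicit stack of
-- (route, perms, emit) states (alternative decomposition, same asymptotic cost).
-- Both versions are generators; equivalence is about the yielded sequence, listed.

-- ===== PORT A =====
-- Fuelled transliteration of A's recursion; the recursion depth is bounded by
-- left_perms.length, so fuel = left_perms.length + 1 makes it total (totality guard only).
def finalize_route_goA : Nat → List Int → List Int → List (List Int)
  | 0, _, _ => []
  | f + 1, current_route, left_perms =>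
    left_perms.foldl (fun acc left_perm =>
      -- current_route[-1]: Python raises IndexError on an empty route; Pre_ excludes
      -- that case (the loop body is then never reached inside Pre_), .getD 0 is a dummy
      if left_perm < (PySem.List.pyGet? current_route (-1)).getD 0 then
        let new_route := current_route ++ [left_perm]
        let next_perms := PySem.List.slice left_perms
          (some (((PySem.List.index? left_perms left_perm).getD 0 : Nat) + 1)) none
        if (PySem.List.pyGet? new_route (-1)).getD 0 = 1 ∨ next_perms.length = 0 ∨
            (PySem.List.pyGet? new_route (-1)).getD 0 <
              (PySem.List.min? next_perms (fun y => y)).getD 0 then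
          acc ++ [new_route]
        else
          acc ++ finalize_route_goA f new_route next_perms
      else acc) []

def finalize_route (current_route : List Int) (left_perms : List Int) : List (List Int) :=
  finalize_route_goA (left_perms.length + 1) current_route left_perms

-- ===== PORT B =====
-- children of one expand state: the inner for-loop of Source B building `children`
def finalize_route_children (route : List Int) (perms : List Int) :
    List (List Int × List Int × Bool) :=
  perms.foldl (fun cs v =>
    if v < (PySem.List.pyGet? route (-1)).getD 0 then
      let new_route := route ++ [v]
      let tail := PySem.List.slice perms
        (some (((PySem.List.index? perms v).getD 0 : Nat) + 1)) none
      let done := (PySem.List.pyGet? new_route (-1)).getD 0 = 1 ∨ tail.length = 0 ∨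
          (PySem.List.pyGet? new_route (-1)).getD 0 <
            (PySem.List.min? tail (fun y => y)).getD 0
      cs ++ [(new_route, tail, if done then true else false)]
    else cs) []

-- the while loop over the stack (head of the list = top of the stack; Source B's
-- `stack.extend(reversed(children))` followed by popping from the end yields the
-- children in their original order, i.e. `children ++ rest` here).
-- Fuel makes the loop total (totality guard only; see finalize_route_cost below).
def finalize_route_goB : Nat → List (List Int × List Int × Bool) → List (List Int) →
    List (List Int)
  | 0, _, out => out
  | _ + 1, [], out => out
  | f + 1, (route, perms, emit) :: rest, out =>
    if emit then finalize_route_goB f rest (out ++ [route])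
    else finalize_route_goB f (finalize_route_children route perms ++ rest) out

-- potential bounding the number of loop iterations spawned by one expand state
def finalize_route_w : Nat → Nat
  | 0 => 1
  | n + 1 => (n + 1) * finalize_route_w n + 1

def finalize_route_cost (stack : List (List Int × List Int × Bool)) : Nat :=
  (stack.map (fun s => if s.2.2 then 1 else finalize_route_w s.2.1.length)).sum

def finalize_route_alt (current_route : List Int) (left_perms : List Int) :
    List (List Int) :=
  finalize_route_goB (finalize_route_cost [(current_route, left_perms, false)])
    [(current_route, left_perms, false)] []

-- ===== PRECONDITION & SPEC =====
-- Pre_ excludes exactly the inputs where Python A raises IndexError: an empty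
-- current_route with a nonempty left_perms (current_route[-1] is evaluated).
def Pre_finalize_route (current_route : List Int) (left_perms : List Int) : Prop :=
  current_route ≠ [] ∨ left_perms = []
instance (current_route : List Int) (left_perms : List Int) :
    Decidable (Pre_finalize_route current_route left_perms) := by
  unfold Pre_finalize_route; infer_instance

def pvWitness_finalize_route : List Int × List Int := ([5], [3, 1, 2, 4, 2])

def Spec_finalize_route (current_route : List Int) (left_perms : List Int)
    (out : List (List Int)) : Prop := out = finalize_route_alt current_route left_perms
instance (current_route : List Int) (left_perms : List Int) (out : List (List Int)) :
    Decidable (Spec_finalize_route current_route left_perms out) := by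
  unfold Spec_finalize_route; infer_instance

-- ===== CLAIM (what is proved, stated in full; the proofs are below) =====
def Claim_equal_finalize_route : Prop := ∀ (current_route : List Int) (left_perms : List Int), Dom_finalize_route current_route left_perms → Pre_finalize_route current_route left_perms → Spec_finalize_route current_route left_perms (finalize_route current_route left_perms)

-- ===== LEMMAS AND PROOFS =====

theorem finalize_route_w_pos (n : Nat) : 1 ≤ finalize_route_w n := by
  cases n <;> simp [finalize_route_w]

theorem finalize_route_w_mono : ∀ {m n : Nat}, m ≤ n →
    finalize_route_w m ≤ finalize_route_w n := by
  intro m n h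
  induction n with
  | zero => have : m = 0 := by omega
            subst this; exact le_refl _
  | succ k ih =>
    rcases Nat.lt_or_ge m (k + 1) with hm | hm
    · have := ih (by omega)
      have hp := finalize_route_w_pos k
      calc finalize_route_w m ≤ finalize_route_w k := this
        _ ≤ (k + 1) * finalize_route_w k + 1 := by nlinarith
        _ = finalize_route_w (k + 1) := by simp [finalize_route_w]
    · have : m = k + 1 := by omega
      subst this; exact le_refl _

theorem finalize_route_slice_len (p : List Int) (idx : Nat) :
    (PySem.List.slice p (some ((idx : Int) + 1)) none).length = p.length - (idx + 1) := by
  have hcast : ((idx : Int) + 1) = (((idx + 1 : Nat)) : Int) := by push_cast; ring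
  rw [hcast, PySem.List.slice_from_natCast]
  simp

-- value of one stack item under A's semantics
def finalize_route_item (s : List Int × List Int × Bool) : List (List Int) :=
  if s.2.2 then [s.1] else finalize_route_goA (s.2.1.length + 1) s.1 s.2.1

theorem finalize_route_item_true (a : List Int) (b : List Int) :
    finalize_route_item (a, b, true) = [a] := rfl

theorem finalize_route_item_false (a : List Int) (b : List Int) :
    finalize_route_item (a, b, false) =
      finalize_route_goA (b.length + 1) a b := rfl

-- fuel insensitivity of A's helper
theorem finalize_route_goA_fuel : ∀ (f g : Nat) (cur lp : List Int),
    lp.length < f → lp.length < g →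
    finalize_route_goA f cur lp = finalize_route_goA g cur lp := by
  intro f
  induction f with
  | zero => intro g cur lp hf; omega
  | succ f ih =>
    intro g cur lp hf hg
    cases g with
    | zero => omega
    | succ g =>
      by_cases hlp : lp = []
      · subst hlp; simp [finalize_route_goA]
      · have hlen : 1 ≤ lp.length := List.length_pos_iff.mpr hlp
        show lp.foldl _ [] = lp.foldl _ []
        congr 1
        funext acc x
        simp only
        split
        · have hlt : (PySem.List.slice lp
              (some (((PySem.List.index? lp x).getD 0 : Nat) + 1)) none).length
              < lp.length := by
            rw [finalize_route_slice_len]; omega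
          rw [ih g (cur ++ [x])
            (PySem.List.slice lp (some (((PySem.List.index? lp x).getD 0 : Nat) + 1)) none)
            (by omega) (by omega)]
        · rfl

-- A's one level equals the flattened children of B's one level
theorem finalize_route_flat_aux (r p : List Int) (hp : p ≠ []) :
    ∀ (l : List Int) (acc : List (List Int × List Int × Bool)),
      (l.foldl (fun cs v =>
        if v < (PySem.List.pyGet? r (-1)).getD 0 then
          let new_route := r ++ [v]
          let tail := PySem.List.slice p
            (some (((PySem.List.index? p v).getD 0 : Nat) + 1)) none
          let done := (PySem.List.pyGet? new_route (-1)).getD 0 = 1 ∨ tail.length = 0 ∨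
              (PySem.List.pyGet? new_route (-1)).getD 0 <
                (PySem.List.min? tail (fun y => y)).getD 0
          cs ++ [(new_route, tail, if done then true else false)]
        else cs) acc).flatMap finalize_route_item =
      l.foldl (fun acc left_perm =>
        if left_perm < (PySem.List.pyGet? r (-1)).getD 0 then
          let new_route := r ++ [left_perm]
          let next_perms := PySem.List.slice p
            (some (((PySem.List.index? p left_perm).getD 0 : Nat) + 1)) none
          if (PySem.List.pyGet? new_route (-1)).getD 0 = 1 ∨ next_perms.length = 0 ∨
              (PySem.List.pyGet? new_route (-1)).getD 0 <
                (PySem.List.min? next_perms (fun y => y)).getD 0 then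
            acc ++ [new_route]
          else acc ++ finalize_route_goA p.length new_route next_perms
        else acc) (acc.flatMap finalize_route_item) := by
  have hlen : 1 ≤ p.length := List.length_pos_iff.mpr hp
  intro l
  induction l with
  | nil => intro acc; simp
  | cons x t ih =>
    intro acc
    simp only [List.foldl_cons]
    rw [ih]
    congr 1
    by_cases hx : x < (PySem.List.pyGet? r (-1)).getD 0
    · simp only [if_pos hx]
      have hlt : (PySem.List.slice p
          (some (((PySem.List.index? p x).getD 0 : Nat) + 1)) none).length
          < p.length := by
        rw [finalize_route_slice_len]; omega
      by_cases hd : (PySem.List.pyGet? (r ++ [x]) (-1)).getD 0 = 1 ∨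
          (PySem.List.slice p (some (((PySem.List.index? p x).getD 0 : Nat) + 1)) none).length = 0 ∨
          (PySem.List.pyGet? (r ++ [x]) (-1)).getD 0 <
            (PySem.List.min? (PySem.List.slice p
              (some (((PySem.List.index? p x).getD 0 : Nat) + 1)) none) (fun y => y)).getD 0
      · simp only [if_pos hd, List.flatMap_append, List.flatMap_cons,
          List.flatMap_nil, List.append_nil, finalize_route_item_true]
      · simp only [if_neg hd, List.flatMap_append,
          List.flatMap_cons, List.flatMap_nil, List.append_nil,
          finalize_route_item_false]
        congr 1
        exact finalize_route_goA_fuel _ p.length _ _ (by omega) hlt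
    · simp only [if_neg hx]

theorem finalize_route_children_flat (r p : List Int) :
    (finalize_route_children r p).flatMap finalize_route_item =
      finalize_route_goA (p.length + 1) r p := by
  by_cases hp : p = []
  · subst hp; simp [finalize_route_children, finalize_route_goA]
  · have h := finalize_route_flat_aux r p hp p []
    simp only [List.flatMap_nil] at h
    unfold finalize_route_children
    rw [h]
    rfl

theorem finalize_route_cost_bound (r p : List Int) :
    ∀ (l : List Int) (acc : List (List Int × List Int × Bool)),
      finalize_route_cost (l.foldl (fun cs v =>
        if v < (PySem.List.pyGet? r (-1)).getD 0 then
          let new_route := r ++ [v]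
          let tail := PySem.List.slice p
            (some (((PySem.List.index? p v).getD 0 : Nat) + 1)) none
          let done := (PySem.List.pyGet? new_route (-1)).getD 0 = 1 ∨ tail.length = 0 ∨
              (PySem.List.pyGet? new_route (-1)).getD 0 <
                (PySem.List.min? tail (fun y => y)).getD 0
          cs ++ [(new_route, tail, if done then true else false)]
        else cs) acc) ≤
        finalize_route_cost acc + l.length * finalize_route_w (p.length - 1) := by
  intro l
  induction l with
  | nil =>
    intro acc
    simp only [List.foldl_nil, List.length_nil, Nat.zero_mul, Nat.add_zero, le_refl]
  | cons x t ih =>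
    intro acc
    simp only [List.foldl_cons, List.length_cons]
    have htail : (PySem.List.slice p
        (some (((PySem.List.index? p x).getD 0 : Nat) + 1)) none).length
        ≤ p.length - 1 := by
      rw [finalize_route_slice_len]; omega
    by_cases hx : x < (PySem.List.pyGet? r (-1)).getD 0
    · simp only [if_pos hx]
      refine le_trans (ih _) ?_
      have hmu : finalize_route_cost (acc ++
          [(r ++ [x], PySem.List.slice p
            (some (((PySem.List.index? p x).getD 0 : Nat) + 1)) none,
            if (PySem.List.pyGet? (r ++ [x]) (-1)).getD 0 = 1 ∨
                (PySem.List.slice p (some (((PySem.List.index? p x).getD 0 : Nat) + 1)) none).length = 0 ∨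
                (PySem.List.pyGet? (r ++ [x]) (-1)).getD 0 <
                  (PySem.List.min? (PySem.List.slice p (some (((PySem.List.index? p x).getD 0 : Nat) + 1)) none) (fun y => y)).getD 0
            then true else false)]) ≤
          finalize_route_cost acc + finalize_route_w (p.length - 1) := by
        by_cases hdone : (PySem.List.pyGet? (r ++ [x]) (-1)).getD 0 = 1 ∨
            (PySem.List.slice p (some (((PySem.List.index? p x).getD 0 : Nat) + 1)) none).length = 0 ∨
            (PySem.List.pyGet? (r ++ [x]) (-1)).getD 0 <
              (PySem.List.min? (PySem.List.slice p (some (((PySem.List.index? p x).getD 0 : Nat) + 1)) none) (fun y => y)).getD 0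
        · simp only [if_pos hdone, finalize_route_cost, List.map_append,
            List.sum_append, List.map_cons, List.map_nil, List.sum_cons,
            List.sum_nil]
          have := finalize_route_w_pos (p.length - 1)
          simpa using this
        · simp only [if_neg hdone, finalize_route_cost, List.map_append,
            List.sum_append, List.map_cons, List.map_nil, List.sum_cons,
            List.sum_nil]
          have := finalize_route_w_mono htail
          simp only [PySem.List.index?_eq_idxOf?] at this
          simp; omega
      rw [Nat.succ_mul]
      omega
    · simp only [if_neg hx]
      refine le_trans (ih acc) ?_
      rw [Nat.succ_mul]
      omega

theorem finalize_route_cost_children (r p : List Int) :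
    finalize_route_cost (finalize_route_children r p) <
      finalize_route_w p.length := by
  have h := finalize_route_cost_bound r p p []
  cases p with
  | nil => simp [finalize_route_children, finalize_route_cost, finalize_route_w]
  | cons y t =>
    have hw := finalize_route_w_pos t.length
    unfold finalize_route_children
    calc finalize_route_cost _ ≤ finalize_route_cost ([] : List (List Int × List Int × Bool)) + (y :: t).length * finalize_route_w ((y :: t).length - 1) := h
      _ < finalize_route_w (y :: t).length := by
          simp only [finalize_route_cost, List.map_nil, List.sum_nil,
            List.length_cons, finalize_route_w, Nat.zero_add,
            Nat.add_sub_cancel]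
          nlinarith

theorem finalize_route_goB_flat : ∀ (n : Nat) (stack : List (List Int × List Int × Bool))
    (out : List (List Int)), finalize_route_cost stack ≤ n →
    finalize_route_goB n stack out = out ++ stack.flatMap finalize_route_item := by
  intro n
  induction n with
  | zero =>
    intro stack out h
    cases stack with
    | nil => simp [finalize_route_goB]
    | cons s rest =>
      exfalso
      have : 1 ≤ finalize_route_cost (s :: rest) := by
        simp only [finalize_route_cost, List.map_cons, List.sum_cons]
        have := finalize_route_w_pos s.2.1.length
        split <;> omega
      omega
  | succ n ih =>
    intro stack out h
    cases stack with
    | nil => simp [finalize_route_goB]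
    | cons s rest =>
      obtain ⟨r, p, emit⟩ := s
      have hc : finalize_route_cost ((r, p, emit) :: rest)
          = (if emit then 1 else finalize_route_w p.length) + finalize_route_cost rest := by
        simp [finalize_route_cost]
      cases emit with
      | true =>
        simp only [finalize_route_goB, if_true]
        rw [ih rest (out ++ [r]) (by simp at hc; omega)]
        simp [finalize_route_item]
      | false =>
        simp only [finalize_route_goB, Bool.false_eq_true, if_false]
        have hcc := finalize_route_cost_children r p
        have happ : finalize_route_cost (finalize_route_children r p ++ rest)
            = finalize_route_cost (finalize_route_children r p) + finalize_route_cost rest := by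
          simp [finalize_route_cost]
        rw [ih _ out (by simp at hc; omega)]
        rw [List.flatMap_append, finalize_route_children_flat]
        simp [finalize_route_item]

-- ===== VERDICT (by name: the statement is the Claim_ definition above) =====
theorem finalize_route_spec : Claim_equal_finalize_route := by
  intro cur lp _ _
  show _ = _
  unfold finalize_route finalize_route_alt
  rw [finalize_route_goB_flat _ _ _ (le_refl _)]
  simp [finalize_route_item]
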